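-- pv_equiv track=rewrite | github.com/mrtraju/mastery_lms | backend/logic.py | get_recommended_modality
-- ===== SOURCE A (Python) =====
-- def get_recommended_modality(vark: dict, failed_modalities: list = None) -> str:
--     """
--     Returns the modality with the highest vector value that hasn't failed.
--     """
--     if failed_modalities is None:
--         failed_modalities = []
--
--     sorted_modalities = sorted(vark.items(), key=lambda x: x[1], reverse=True)
--
--     for modality, score in sorted_modalities:
--         if modality not in failed_modalities:
--             return modality
--
--     # If all failed, return the one with the highest score anyway (or implement scaffolding)
--     return sorted_modalities[0][0]
-- ===== SOURCE B (Python) =====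
-- def get_recommended_modality(vark: dict, failed_modalities: list = None) -> str:
--     """
--     Single linear pass: track the highest-scoring modality overall and the
--     highest-scoring non-failed modality (strict '>' keeps the first of ties,
--     matching the stable descending sort).
--     """
--     failed = set() if failed_modalities is None else set(failed_modalities)
--     best = None
--     best_ok = None
--     for modality, score in vark.items():
--         if best is None or score > best[1]:
--             best = (modality, score)
--         if modality not in failed and (best_ok is None or score > best_ok[1]):
--             best_ok = (modality, score)
--     if best_ok is not None:
--         return best_ok[0]
--     return best[0]
-- ===== Notes on version B (the rewrite author's own statement) =====
-- stated objective: alternative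
-- what changed: Replaced the sort-then-scan (stable descending sort of all items, then a linear search for the first non-failed one) by a single left-to-right pass over the items that maintains two running winners (overall best and best non-failed, membership tested against a set built once) updated only on strictly greater score, which preserves the insertion-order tie-breaking of the stable sort.
import Mathlib
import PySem

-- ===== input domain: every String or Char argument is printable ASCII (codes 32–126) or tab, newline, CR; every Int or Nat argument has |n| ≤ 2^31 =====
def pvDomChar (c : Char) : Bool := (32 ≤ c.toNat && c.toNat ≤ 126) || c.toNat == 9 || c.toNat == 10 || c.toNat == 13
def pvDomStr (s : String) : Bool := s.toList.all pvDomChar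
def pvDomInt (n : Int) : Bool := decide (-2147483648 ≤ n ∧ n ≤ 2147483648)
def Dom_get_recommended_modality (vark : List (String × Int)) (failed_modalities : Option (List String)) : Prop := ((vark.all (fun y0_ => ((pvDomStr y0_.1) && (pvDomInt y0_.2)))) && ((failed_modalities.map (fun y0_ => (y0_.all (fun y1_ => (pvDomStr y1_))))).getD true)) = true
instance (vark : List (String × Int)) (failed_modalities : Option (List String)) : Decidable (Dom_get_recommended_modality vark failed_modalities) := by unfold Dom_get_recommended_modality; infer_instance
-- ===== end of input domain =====

-- B replaces A's sort-then-scan by one linear pass keeping two running winners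
-- (overall best, best non-failed) with strict '>' — same result, no sort (objective: alternative).

-- ===== PORT A =====
-- the 'for modality, score in sorted_modalities: if modality not in failed_modalities: return modality' loop
def pvLoopA (fm : List String) : List (String × Int) → Option String
  | [] => none
  | (m, _) :: t => if m ∈ fm then pvLoopA fm t else some m

def get_recommended_modality (vark : List (String × Int)) (failed_modalities : Option (List String)) : String :=
  let fm := failed_modalities.getD []
  let sorted_modalities := PySem.List.sorted vark (fun x => x.2) true
  match pvLoopA fm sorted_modalities with
  | some m => m
  | none =>
    match PySem.List.pyGet? sorted_modalities 0 with
    | some x => x.1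
    | none => ""   -- sorted_modalities[0] raises IndexError on empty vark; excluded by Pre_

-- ===== PORT B =====
-- 'best is None or score > best[1]' update of a running winner
def pvStep (b : Option (String × Int)) (x : String × Int) : Option (String × Int) :=
  match b with
  | none => some x
  | some b => if x.2 > b.2 then some x else some b

def get_recommended_modality_alt (vark : List (String × Int)) (failed_modalities : Option (List String)) : String :=
  let failed : PySem.Set String := PySem.Set.ofList (failed_modalities.getD [])
  let st := vark.foldl
    (fun (st : Option (String × Int) × Option (String × Int)) x =>
      (pvStep st.1 x, if x.1 ∈ failed then st.2 else pvStep st.2 x))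
    (none, none)
  match st.2 with
  | some b => b.1
  | none =>
    match st.1 with
    | some b => b.1
    | none => ""   -- best[0] with best = None raises on empty vark; excluded by Pre_

-- ===== PRECONDITION & SPEC =====
-- Pre_ excludes only the empty dict, on which A raises IndexError (and B's Python raises too).
def Pre_get_recommended_modality (vark : List (String × Int)) (failed_modalities : Option (List String)) : Prop := vark ≠ []
instance (vark : List (String × Int)) (failed_modalities : Option (List String)) : Decidable (Pre_get_recommended_modality vark failed_modalities) := by unfold Pre_get_recommended_modality; infer_instance

def pvWitness_get_recommended_modality : (List (String × Int)) × Option (List String) := ([("visual", 3), ("aural", 5)], some ["aural"])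

def Spec_get_recommended_modality (vark : List (String × Int)) (failed_modalities : Option (List String)) (out : String) : Prop := out = get_recommended_modality_alt vark failed_modalities
instance (vark : List (String × Int)) (failed_modalities : Option (List String)) (out : String) : Decidable (Spec_get_recommended_modality vark failed_modalities out) := by unfold Spec_get_recommended_modality; infer_instance

-- ===== CLAIM (what is proved, stated in full; the proofs are below) =====
def Claim_equal_get_recommended_modality : Prop := ∀ (vark : List (String × Int)) (failed_modalities : Option (List String)), Dom_get_recommended_modality vark failed_modalities → Pre_get_recommended_modality vark failed_modalities → Spec_get_recommended_modality vark failed_modalities (get_recommended_modality vark failed_modalities)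

-- ===== LEMMAS AND PROOFS =====

-- inserting an element strictly greater than everything puts it in front
theorem pv_insertBy_front (x : String × Int) (ys : List (String × Int))
    (h : ∀ z ∈ ys, z.2 < x.2) :
    PySem.List.insertBy (fun a b => decide (b.2 < a.2)) x ys = x :: ys := by
  cases ys with
  | nil => rfl
  | cons y t =>
    simp only [PySem.List.insertBy]
    rw [if_pos]
    exact decide_eq_true (h y (List.mem_cons_self))

-- filtering commutes with one descending stable insertion
theorem pv_filter_insertBy (p : String × Int → Bool) (x : String × Int)
    (ys : List (String × Int)) (h : ys.Pairwise (fun a b => b.2 ≤ a.2)) :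
    (PySem.List.insertBy (fun a b => decide (b.2 < a.2)) x ys).filter p
      = if p x then PySem.List.insertBy (fun a b => decide (b.2 < a.2)) x (ys.filter p)
        else ys.filter p := by
  induction ys with
  | nil =>
    simp [PySem.List.insertBy, List.filter]
    by_cases hp : p x <;> simp [hp, PySem.List.insertBy]
  | cons y t ih =>
    rcases List.pairwise_cons.mp h with ⟨hy, ht⟩
    simp only [PySem.List.insertBy]
    by_cases hxy : y.2 < x.2
    · rw [if_pos (decide_eq_true hxy)]
      by_cases hpx : p x <;> by_cases hpy : p y
      · simp [List.filter, hpx, hpy, PySem.List.insertBy, hxy]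
      · have hfront : PySem.List.insertBy (fun a b => decide (b.2 < a.2)) x (t.filter p)
            = x :: t.filter p := by
          apply pv_insertBy_front
          intro z hz
          exact lt_of_le_of_lt (hy z (List.mem_of_mem_filter hz)) hxy
        simp [List.filter_cons, hpx, hpy, hfront]
      · simp [List.filter, hpx, hpy]
      · simp [List.filter, hpx, hpy]
    · rw [if_neg (by simpa using hxy)]
      by_cases hpy : p y
      · simp only [List.filter, hpy, if_true, ih ht]
        by_cases hpx : p x
        · simp [hpx, PySem.List.insertBy, hxy]
        · simp [hpx]
      · simp [List.filter, hpy, ih ht]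

-- sorted of a snoc is an insertion into sorted
theorem pv_sorted_snoc (l : List (String × Int)) (x : String × Int) :
    PySem.List.sorted (l ++ [x]) (fun z => z.2) true
      = PySem.List.insertBy (fun a b => decide (b.2 < a.2)) x
          (PySem.List.sorted l (fun z => z.2) true) := by
  rw [PySem.List.sorted_rev_eq_foldl_insertBy, PySem.List.sorted_rev_eq_foldl_insertBy,
    List.foldl_append]
  rfl

-- filtering commutes with the stable descending sort
theorem pv_sorted_filter (p : String × Int → Bool) (l : List (String × Int)) :
    PySem.List.sorted (l.filter p) (fun z => z.2) true
      = (PySem.List.sorted l (fun z => z.2) true).filter p := by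
  induction l using List.reverseRecOn with
  | nil => rfl
  | append_singleton l x ih =>
    have hpw : (PySem.List.sorted l (fun z : String × Int => z.2) true).Pairwise
        (fun a b => b.2 ≤ a.2) := PySem.List.sorted_pairwise_rev l (fun z => z.2)
    rw [pv_sorted_snoc, pv_filter_insertBy p x _ hpw, List.filter_append]
    by_cases hp : p x
    · simp only [List.filter, hp, if_pos]
      rw [pv_sorted_snoc, ih]
    · simp [List.filter, hp, ih]

-- the head of the descending stable sort is B's running 'first strict max'
theorem pv_head_sorted (l : List (String × Int)) :
    (PySem.List.sorted l (fun z => z.2) true).head? = l.foldl pvStep none := by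
  induction l using List.reverseRecOn with
  | nil => rfl
  | append_singleton l x ih =>
    rw [pv_sorted_snoc, List.foldl_append, List.foldl_cons, List.foldl_nil, ← ih]
    cases hs : PySem.List.sorted l (fun z : String × Int => z.2) true with
    | nil => rfl
    | cons y t =>
      simp only [PySem.List.insertBy, List.head?_cons, pvStep]
      by_cases hxy : y.2 < x.2
      · rw [if_pos (decide_eq_true hxy)]
        simp [gt_iff_lt, hxy]
      · rw [if_neg (by simpa using hxy)]
        simp [gt_iff_lt, hxy]

-- A's linear scan returns the first element passing the not-failed test
theorem pv_loopA_eq (fm : List String) (s : List (String × Int)) :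
    pvLoopA fm s = (s.filter (fun x => decide (x.1 ∉ fm))).head?.map Prod.fst := by
  induction s with
  | nil => rfl
  | cons y t ih =>
    obtain ⟨m, sc⟩ := y
    by_cases hc : m ∈ fm
    · simp [pvLoopA, List.filter_cons, hc, ih]
    · simp [pvLoopA, List.filter_cons, hc]

-- B's paired fold splits into the two independent folds
theorem pv_foldl_prod (fm : List String) (l : List (String × Int))
    (b c : Option (String × Int)) :
    l.foldl (fun (st : Option (String × Int) × Option (String × Int)) x =>
        (pvStep st.1 x, if x.1 ∈ fm then st.2 else pvStep st.2 x)) (b, c)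
      = (l.foldl pvStep b,
         l.foldl (fun st x => if x.1 ∈ fm then st else pvStep st x) c) := by
  induction l generalizing b c with
  | nil => rfl
  | cons x t ih =>
    simp only [List.foldl_cons]
    exact ih _ _

-- the guarded fold is the fold over the filtered list
theorem pv_foldl_guard (fm : List String) (l : List (String × Int))
    (c : Option (String × Int)) :
    l.foldl (fun st x => if x.1 ∈ fm then st else pvStep st x) c
      = (l.filter (fun x => decide (x.1 ∉ fm))).foldl pvStep c := by
  induction l generalizing c with
  | nil => rfl
  | cons x t ih =>
    by_cases hc : x.1 ∈ fm
    · simp [List.foldl_cons, List.filter_cons, hc, ih]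
    · simp [List.foldl_cons, List.filter_cons, hc, ih]

-- ===== VERDICT (by name: the statement is the Claim_ definition above) =====
theorem get_recommended_modality_spec : Claim_equal_get_recommended_modality := by
  intro vark failed_modalities _ hpre
  unfold Spec_get_recommended_modality
  unfold get_recommended_modality get_recommended_modality_alt
  simp only []
  set fm := failed_modalities.getD [] with hfm
  set p : String × Int → Bool := fun x => decide (x.1 ∉ fm) with hp
  rw [pv_foldl_prod (PySem.Set.ofList fm), pv_foldl_guard, pv_loopA_eq]
  have hpred : vark.filter (fun x => decide (x.1 ∉ PySem.Set.ofList fm)) = vark.filter p := by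
    apply List.filter_congr
    intro a _
    simp [hp, PySem.Set.mem_ofList]
  rw [hpred]
  have hfilter : (PySem.List.sorted vark (fun x => x.2) true).filter p
      = PySem.List.sorted (vark.filter p) (fun z => z.2) true := (pv_sorted_filter p vark).symm
  rw [hfilter]
  have h2 : (PySem.List.sorted (vark.filter p) (fun z => z.2) true).head?
      = (vark.filter p).foldl pvStep none := pv_head_sorted _
  rw [h2]
  cases hbo : (vark.filter p).foldl pvStep none with
  | some b => rfl
  | none =>
    simp only [Option.map_none]
    have hsne : PySem.List.sorted vark (fun x : String × Int => x.2) true ≠ [] := by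
      intro h
      exact hpre ((PySem.List.sorted_eq_nil_iff vark (fun x => x.2) true).mp h)
    cases hs : PySem.List.sorted vark (fun x : String × Int => x.2) true with
    | nil => exact absurd hs hsne
    | cons y t =>
      have hh : vark.foldl pvStep none = some y := by
        rw [← pv_head_sorted, hs]; rfl
      rw [hh]
      simp [PySem.List.pyGet?, PySem.List.pyIdx?]
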